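-- pv_equiv track=rewrite | github.com/ByungHeonLEE/ot-git | suggest.py | suggest_commit_message
-- ===== SOURCE A (Python) =====
-- def suggest_commit_message(code_diff):
--     # This is a very basic implementation
--     # In a real-world scenario, this would be much more sophisticated
--
--     added_lines = [line for line in code_diff.split('\n') if line.startswith('+')]
--
--     if not added_lines:
--         return "Update code"
--
--     # Try to identify the main action
--     if any('def ' in line for line in added_lines):
--         return "Add new function"
--     elif any('class ' in line for line in added_lines):
--         return "Add new class"
--     elif any('import ' in line for line in added_lines):
--         return "Add new import"
--
--     # Default message
--     return "Update code"
-- ===== SOURCE B (Python) =====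
-- def suggest_commit_message(code_diff):
--     # single pass over the diff lines, accumulating flags; priority def > class > import
--     has_added = has_def = has_class = has_import = False
--     for line in code_diff.split('\n'):
--         if line.startswith('+'):
--             has_added = True
--             if 'def ' in line:
--                 has_def = True
--             if 'class ' in line:
--                 has_class = True
--             if 'import ' in line:
--                 has_import = True
--     if not has_added:
--         return "Update code"
--     if has_def:
--         return "Add new function"
--     if has_class:
--         return "Add new class"
--     if has_import:
--         return "Add new import"
--     return "Update code"
-- ===== Notes on version B (the rewrite author's own statement) =====
-- stated objective: alternative
-- what changed: Replaces A's filter-then-three-short-circuited-any scans with a single fold over the split lines accumulating four boolean flags, deciding the message after the loop.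
import Mathlib
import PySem

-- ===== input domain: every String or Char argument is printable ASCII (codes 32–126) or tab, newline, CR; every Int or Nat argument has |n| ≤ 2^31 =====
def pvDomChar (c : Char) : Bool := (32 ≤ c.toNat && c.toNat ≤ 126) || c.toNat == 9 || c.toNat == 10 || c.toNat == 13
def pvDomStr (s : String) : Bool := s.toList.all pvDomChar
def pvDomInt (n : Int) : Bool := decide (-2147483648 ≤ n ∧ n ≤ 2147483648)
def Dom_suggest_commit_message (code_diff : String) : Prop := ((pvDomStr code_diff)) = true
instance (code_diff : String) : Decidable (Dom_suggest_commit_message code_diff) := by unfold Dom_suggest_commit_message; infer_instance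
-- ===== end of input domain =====

-- B replaces A's filter plus three short-circuited any-scans with one fold accumulating four flags (alternative decomposition, same cost).


-- ===== PORT A =====
def suggest_commit_message (code_diff : String) : String :=
  let added_lines := ((PySem.Str.split? code_diff "\n").getD []).filter
    (fun line => PySem.Str.startswith line "+")
  if added_lines.isEmpty then "Update code"
  else if added_lines.any (fun line => PySem.Str.isIn "def " line) then "Add new function"
  else if added_lines.any (fun line => PySem.Str.isIn "class " line) then "Add new class"
  else if added_lines.any (fun line => PySem.Str.isIn "import " line) then "Add new import"
  else "Update code"

-- ===== PORT B =====
def suggestAltStep (st : Bool × Bool × Bool × Bool) (line : String) : Bool × Bool × Bool × Bool :=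
  if PySem.Str.startswith line "+" then
    (true,
     st.2.1 || PySem.Str.isIn "def " line,
     st.2.2.1 || PySem.Str.isIn "class " line,
     st.2.2.2 || PySem.Str.isIn "import " line)
  else st

def suggest_commit_message_alt (code_diff : String) : String :=
  let st := ((PySem.Str.split? code_diff "\n").getD []).foldl suggestAltStep (false, false, false, false)
  if !st.1 then "Update code"
  else if st.2.1 then "Add new function"
  else if st.2.2.1 then "Add new class"
  else if st.2.2.2 then "Add new import"
  else "Update code"

-- ===== PRECONDITION & SPEC =====
def Spec_suggest_commit_message (code_diff : String) (out : String) : Prop := out = suggest_commit_message_alt code_diff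
instance (code_diff : String) (out : String) : Decidable (Spec_suggest_commit_message code_diff out) := by unfold Spec_suggest_commit_message; infer_instance

-- ===== CLAIM (what is proved, stated in full; the proofs are below) =====
def Claim_equal_suggest_commit_message : Prop := ∀ (code_diff : String), Dom_suggest_commit_message code_diff → Spec_suggest_commit_message code_diff (suggest_commit_message code_diff)

-- ===== LEMMAS AND PROOFS =====

-- The fold's state is exactly the four flags A computes via filter/any.
theorem suggestAltStep_foldl (ls : List String) (a d c i : Bool) :
    ls.foldl suggestAltStep (a, d, c, i) =
      (a || ls.any (fun l => PySem.Str.startswith l "+"),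
       d || (ls.filter (fun l => PySem.Str.startswith l "+")).any (fun l => PySem.Str.isIn "def " l),
       c || (ls.filter (fun l => PySem.Str.startswith l "+")).any (fun l => PySem.Str.isIn "class " l),
       i || (ls.filter (fun l => PySem.Str.startswith l "+")).any (fun l => PySem.Str.isIn "import " l)) := by
  induction ls generalizing a d c i with
  | nil => simp
  | cons h t ih =>
    by_cases hp : PySem.Chars.startswith h.toList ['+'] = true
    · simp [suggestAltStep, hp, ih, Bool.or_assoc]
    · simp at hp
      simp [suggestAltStep, hp, ih]

-- ===== VERDICT (by name: the statement is the Claim_ definition above) =====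
theorem suggest_commit_message_spec : Claim_equal_suggest_commit_message := by
  intro code_diff _
  unfold Spec_suggest_commit_message suggest_commit_message suggest_commit_message_alt
  rw [suggestAltStep_foldl]
  simp only [Bool.false_or]
  set ls := (PySem.Str.split? code_diff "\n").getD []
  have key : (ls.filter (fun line => PySem.Str.startswith line "+")).isEmpty
      = !(ls.any fun l => PySem.Str.startswith l "+") := by
    cases h : ls.any (fun l => PySem.Str.startswith l "+") with
    | false =>
      simp only [Bool.not_false, List.isEmpty_iff, List.filter_eq_nil_iff]
      simpa using (List.any_eq_false.mp h)
    | true =>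
      rcases List.any_eq_true.mp h with ⟨x, hx, hpx⟩
      simp only [Bool.not_true, List.isEmpty_eq_false_iff, ne_eq, List.filter_eq_nil_iff]
      intro hall
      exact absurd hpx (by simpa using hall x hx)
  rw [key]
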